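-- pv_equiv track=rewrite | github.com/PatoLocos/Erdos530 | experiments/sidon_cpsat.py | is_sidon_check
-- ===== SOURCE A (Python) =====
-- def is_sidon_check(S):
--     """Verify a set is Sidon."""
--     S = sorted(S)
--     sums = set()
--     for i, a in enumerate(S):
--         for j, b in enumerate(S):
--             if i <= j:
--                 s = a + b
--                 if s in sums:
--                     return False
--                 sums.add(s)
--     return True
-- ===== SOURCE B (Python) =====
-- def is_sidon_check(S):
--     """Verify a set is Sidon via the classical difference characterization:
--     a set is Sidon iff its elements are distinct and all pairwise differences
--     of distinct elements are distinct."""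
--     S = sorted(S)
--     diffs = [b - a for i, a in enumerate(S) for b in S[i + 1:]]
--     return len(set(S)) == len(S) and len(set(diffs)) == len(diffs)
-- ===== Notes on version B (the rewrite author's own statement) =====
-- stated objective: alternative
-- what changed: Replaces the collision test on pairwise SUMS by the classical equivalent Sidon characterization via DIFFERENCES: the elements are distinct and all differences b-a over ordered pairs a<b are distinct; correctness rests on the textbook bijection between sum collisions a_i+a_j=a_k+a_l and difference collisions a_j-a_k=a_l-a_i.
import Mathlib
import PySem

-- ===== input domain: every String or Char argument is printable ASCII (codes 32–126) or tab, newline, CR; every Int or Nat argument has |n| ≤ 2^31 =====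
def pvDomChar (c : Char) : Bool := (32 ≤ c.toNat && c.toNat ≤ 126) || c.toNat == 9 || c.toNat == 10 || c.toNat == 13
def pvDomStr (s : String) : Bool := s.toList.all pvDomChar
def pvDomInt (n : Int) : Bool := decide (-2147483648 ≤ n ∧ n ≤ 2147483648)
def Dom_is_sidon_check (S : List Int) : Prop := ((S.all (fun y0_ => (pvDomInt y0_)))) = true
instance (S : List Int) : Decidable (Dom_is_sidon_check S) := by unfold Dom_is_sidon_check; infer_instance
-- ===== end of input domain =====

-- B checks the classical equivalent Sidon characterization via DIFFERENCES (distinct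
-- elements and all pairwise differences distinct) instead of A's pairwise-sum collision
-- scan with an incremental set (alternative algorithm, same asymptotic cost).

-- ===== PORT A =====
-- inner 'for j, b in enumerate(S)' loop; none = the 'return False' early exit
def pvInnerA (i a : Int) : List (Int × Int) → PySem.Set Int → Option (PySem.Set Int)
  | [], sums => some sums
  | (j, b) :: rest, sums =>
    if i ≤ j then
      if PySem.Set.contains sums (a + b) then none
      else pvInnerA i a rest (PySem.Set.add sums (a + b))
    else pvInnerA i a rest sums

-- outer 'for i, a in enumerate(S)' loop
def pvOuterA (full : List (Int × Int)) : List (Int × Int) → PySem.Set Int → Bool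
  | [], _ => true
  | (i, a) :: rest, sums =>
    match pvInnerA i a full sums with
    | none => false
    | some sums' => pvOuterA full rest sums'

def is_sidon_check (S : List Int) : Bool :=
  let T := PySem.List.sorted S (fun x => x) false
  let e := PySem.List.enumerate T
  pvOuterA e e PySem.Set.empty

-- ===== PORT B =====
def is_sidon_check_alt (S : List Int) : Bool :=
  let T := PySem.List.sorted S (fun x => x) false
  let diffs := (PySem.List.enumerate T).flatMap
    (fun p => (PySem.List.slice T (some (p.1 + 1)) none).map (fun b => b - p.2))
  (PySem.Set.ofList T).length == T.length && (PySem.Set.ofList diffs).length == diffs.length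

-- ===== PRECONDITION & SPEC =====
def Spec_is_sidon_check (S : List Int) (out : Bool) : Prop := out = is_sidon_check_alt S
instance (S : List Int) (out : Bool) : Decidable (Spec_is_sidon_check S out) := by unfold Spec_is_sidon_check; infer_instance

-- ===== CLAIM (what is proved, stated in full; the proofs are below) =====
def Claim_equal_is_sidon_check : Prop := ∀ (S : List Int), Dom_is_sidon_check S → Spec_is_sidon_check S (is_sidon_check S)

-- ===== LEMMAS AND PROOFS =====

-- A's multiset of sums T[k]+T[l] (k ≤ l), row by row
def sumsOf : List Int → List Int
  | [] => []
  | x :: R => (x :: R).map (fun b => x + b) ++ sumsOf R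

-- B's multiset of differences T[l]-T[k] (k < l), row by row
def diffsOf : List Int → List Int
  | [] => []
  | x :: R => R.map (fun b => b - x) ++ diffsOf R

-- sequential insertion of a list of values into a set; none at the first repeat
def pvAddAll : List Int → PySem.Set Int → Option (PySem.Set Int)
  | [], s => some s
  | x :: l, s => if PySem.Set.contains s x then none else pvAddAll l (PySem.Set.add s x)

theorem pvInnerA_eq (i a : Int) : ∀ (E : List (Int × Int)) (s : PySem.Set Int),
    pvInnerA i a E s
      = pvAddAll ((E.filter (fun p => decide (i ≤ p.1))).map (fun p => a + p.2)) s := by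
  intro E
  induction E with
  | nil => intro s; rfl
  | cons p rest ih =>
    intro s
    obtain ⟨j, b⟩ := p
    by_cases h : i ≤ j
    · simp [pvInnerA, h, List.filter, pvAddAll]
      split_ifs with hc
      · rfl
      · exact ih _
    · simp [pvInnerA, h, List.filter]
      exact ih _

theorem pvAddAll_append : ∀ (l1 l2 : List Int) (s : PySem.Set Int),
    pvAddAll (l1 ++ l2) s = (pvAddAll l1 s).bind (pvAddAll l2) := by
  intro l1
  induction l1 with
  | nil => intro l2 s; rfl
  | cons x l ih =>
    intro l2 s
    simp only [List.cons_append, pvAddAll]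
    split_ifs with hc
    · rfl
    · exact ih _ _

theorem pvOuterA_eq (full : List (Int × Int)) : ∀ (rows : List (Int × Int)) (s : PySem.Set Int),
    pvOuterA full rows s
      = (pvAddAll (rows.flatMap
          (fun p => ((full.filter (fun q => decide (p.1 ≤ q.1))).map (fun q => p.2 + q.2)))) s).isSome := by
  intro rows
  induction rows with
  | nil => intro s; rfl
  | cons p rest ih =>
    intro s
    obtain ⟨i, a⟩ := p
    simp only [pvOuterA, List.flatMap_cons, pvAddAll_append, pvInnerA_eq]
    cases h : pvAddAll ((full.filter (fun q => decide (i ≤ q.1))).map (fun q => a + q.2)) s with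
    | none => simp
    | some s' => simp [ih]

theorem pvAddAll_isSome : ∀ (l : List Int) (s : PySem.Set Int),
    (pvAddAll l s).isSome = true ↔ l.Nodup ∧ ∀ x ∈ l, x ∉ s := by
  intro l
  induction l with
  | nil => intro s; simp [pvAddAll]
  | cons x l ih =>
    intro s
    simp only [pvAddAll]
    split_ifs with hc
    · have hx : x ∈ s := (PySem.Set.contains_iff s x).1 hc
      constructor
      · intro h; simp at h
      · rintro ⟨-, hall⟩; exact absurd hx (hall x List.mem_cons_self)
    · rw [ih]
      have hxns : x ∉ s := fun hx => hc ((PySem.Set.contains_iff s x).2 hx)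
      constructor
      · rintro ⟨hnd, hall⟩
        refine ⟨List.nodup_cons.2 ⟨?_, hnd⟩, ?_⟩
        · intro hxl
          have := hall x hxl
          simp [PySem.Set.mem_add] at this
        · intro y hy
          rcases List.mem_cons.1 hy with hy | hy
          · exact hy ▸ hxns
          · intro hys
            exact (hall y hy) (by simp [PySem.Set.mem_add, hys])
      · rintro ⟨hnd, hall⟩
        rcases List.nodup_cons.1 hnd with ⟨hxl, hnd'⟩
        refine ⟨hnd', ?_⟩
        intro y hy hymem
        rw [PySem.Set.mem_add] at hymem
        rcases hymem with hys | hyx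
        · exact (hall y (List.mem_cons_of_mem x hy)) hys
        · exact hxl (hyx ▸ hy)

theorem filter_enumerate_all (i : Int) : ∀ (xs : List Int) (s : Int), i ≤ s →
    (PySem.List.enumerate xs s).filter (fun p => decide (i ≤ p.1)) = PySem.List.enumerate xs s := by
  intro xs
  induction xs with
  | nil => intro s _; simp [PySem.List.enumerate_nil]
  | cons x xs ih =>
    intro s hs
    rw [PySem.List.enumerate_cons]
    simp only [List.filter_cons]
    rw [if_pos (by simpa using hs), ih (s + 1) (by omega)]

theorem filter_enumerate_drop (i : Int) : ∀ (xs : List Int) (s : Int), s ≤ i →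
    ((PySem.List.enumerate xs s).filter (fun p => decide (i ≤ p.1))).map (·.2)
      = xs.drop (i - s).toNat := by
  intro xs
  induction xs with
  | nil => intro s _; simp [PySem.List.enumerate_nil]
  | cons x xs ih =>
    intro s hs
    rw [PySem.List.enumerate_cons]
    simp only [List.filter_cons]
    by_cases h : i ≤ s
    · have hi : i = s := le_antisymm h hs
      rw [if_pos (by simpa using h), filter_enumerate_all i xs (s + 1) (by omega)]
      simp [PySem.List.map_snd_enumerate, hi]
    · rw [if_neg (by simpa using h)]
      rw [ih (s + 1) (by omega)]
      have h1 : (i - s).toNat = (i - (s + 1)).toNat + 1 := by omega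
      rw [h1, List.drop_succ_cons]

theorem fst_enumerate_nonneg {T : List Int} {p : Int × Int}
    (hp : p ∈ PySem.List.enumerate T) : 0 ≤ p.1 := by
  have : p.1 ∈ (PySem.List.enumerate T).map (·.1) := List.mem_map_of_mem hp
  rw [PySem.List.map_fst_enumerate] at this
  exact (PySem.List.mem_pyRange_one.1 this).1

-- each row of A's flattened sums equals the slice form for the same enumerate entry
theorem row_eq (T : List Int) {p : Int × Int} (hp : p ∈ PySem.List.enumerate T) :
    ((PySem.List.enumerate T).filter (fun q => decide (p.1 ≤ q.1))).map (fun q => p.2 + q.2)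
      = (PySem.List.slice T (some p.1) none).map (fun b => p.2 + b) := by
  have h0 : 0 ≤ p.1 := fst_enumerate_nonneg hp
  rw [PySem.List.slice_from T h0]
  have := filter_enumerate_drop p.1 T 0 h0
  simp only [sub_zero] at this
  rw [← this, List.map_map]
  rfl

-- flattened slice form of A's sums = sumsOf, generalized over the suffix position
theorem flat_sums_eq : ∀ (R T : List Int) (s : Nat), T.drop s = R →
    (PySem.List.enumerate R (s : Int)).flatMap
      (fun p => (PySem.List.slice T (some p.1) none).map (fun b => p.2 + b)) = sumsOf R := by
  intro R
  induction R with
  | nil => intro T s _; simp [PySem.List.enumerate_nil, sumsOf]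
  | cons x R' ih =>
    intro T s hdrop
    rw [PySem.List.enumerate_cons, List.flatMap_cons]
    have h1 : PySem.List.slice T (some (s : Int)) none = x :: R' := by
      rw [PySem.List.slice_from_natCast, hdrop]
    have h2 : T.drop (s + 1) = R' := by
      have : T.drop (s + 1) = (T.drop s).drop 1 := by
        rw [List.drop_drop]
      rw [this, hdrop]; rfl
    have h3 : ((s : Int) + 1) = ((s + 1 : Nat) : Int) := by push_cast; ring
    rw [h1, h3, ih T (s + 1) h2]
    rfl

-- flattened slice form of B's diffs = diffsOf, generalized over the suffix position
theorem flat_diffs_eq : ∀ (R T : List Int) (s : Nat), T.drop s = R →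
    (PySem.List.enumerate R (s : Int)).flatMap
      (fun p => (PySem.List.slice T (some (p.1 + 1)) none).map (fun b => b - p.2)) = diffsOf R := by
  intro R
  induction R with
  | nil => intro T s _; simp [PySem.List.enumerate_nil, diffsOf]
  | cons x R' ih =>
    intro T s hdrop
    rw [PySem.List.enumerate_cons, List.flatMap_cons]
    have h3 : ((s : Int) + 1) = ((s + 1 : Nat) : Int) := by push_cast; ring
    have h2 : T.drop (s + 1) = R' := by
      have : T.drop (s + 1) = (T.drop s).drop 1 := by
        rw [List.drop_drop]
      rw [this, hdrop]; rfl
    have h1 : PySem.List.slice T (some ((s : Int) + 1)) none = R' := by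
      rw [h3, PySem.List.slice_from_natCast, h2]
    rw [h1, h3, ih T (s + 1) h2]
    rfl

-- set(xs) has the same length as xs exactly when xs has no duplicates
theorem pvOfList_sublist : ∀ (xs : List Int), (PySem.Set.ofList xs).Sublist xs := by
  intro xs
  induction xs using List.reverseRecOn with
  | nil => simp [PySem.Set.ofList_nil]
  | append_singleton xs x ih =>
    rw [PySem.Set.ofList_append_singleton, PySem.Set.add_eq_ite]
    split_ifs with h
    · exact ih.trans (List.sublist_append_left xs [x])
    · exact ih.append_right [x]

theorem length_ofList_eq_iff_nodup (xs : List Int) :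
    (PySem.Set.ofList xs).length = xs.length ↔ xs.Nodup := by
  constructor
  · intro h
    have := (pvOfList_sublist xs).eq_of_length h
    rw [← this]; exact PySem.Set.nodup_ofList xs
  · intro h
    rw [PySem.Set.ofList_eq_self_of_nodup xs h]

-- membership characterizations
theorem pvGetD_index_of_mem {R : List Int} {t : Int} (h : t ∈ R) :
    ∃ j, j < R.length ∧ R.getD j 0 = t := by
  obtain ⟨j, hj, ht⟩ := List.mem_iff_getElem.1 h
  exact ⟨j, hj, by rw [List.getD_eq_getElem R 0 hj, ht]⟩

theorem mem_sumsOf_iff : ∀ (T : List Int) (v : Int),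
    v ∈ sumsOf T ↔ ∃ k l, k ≤ l ∧ l < T.length ∧ v = T.getD k 0 + T.getD l 0 := by
  intro T
  induction T with
  | nil => intro v; simp [sumsOf]
  | cons x R ih =>
    intro v
    rw [sumsOf, List.mem_append, List.mem_map, ih]
    constructor
    · rintro (⟨b, hb, rfl⟩ | ⟨k, l, hkl, hl, rfl⟩)
      · obtain ⟨j, hj, hjb⟩ := pvGetD_index_of_mem hb
        exact ⟨0, j, Nat.zero_le _, hj, by rw [List.getD_cons_zero, hjb]⟩
      · exact ⟨k + 1, l + 1, by omega, by simpa using hl, by simp⟩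
    · rintro ⟨k, l, hkl, hl, rfl⟩
      cases k with
      | zero =>
        left
        refine ⟨(x :: R).getD l 0, ?_, by simp⟩
        rw [List.getD_eq_getElem _ 0 hl]
        exact List.getElem_mem hl
      | succ k' =>
        right
        cases l with
        | zero => omega
        | succ l' => exact ⟨k', l', by omega, by simpa using hl, by simp⟩

theorem mem_diffsOf_iff : ∀ (T : List Int) (v : Int),
    v ∈ diffsOf T ↔ ∃ k l, k < l ∧ l < T.length ∧ v = T.getD l 0 - T.getD k 0 := by
  intro T
  induction T with
  | nil => intro v; simp [diffsOf]
  | cons x R ih =>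
    intro v
    rw [diffsOf, List.mem_append, List.mem_map, ih]
    constructor
    · rintro (⟨b, hb, rfl⟩ | ⟨k, l, hkl, hl, rfl⟩)
      · obtain ⟨j, hj, hjb⟩ := pvGetD_index_of_mem hb
        exact ⟨0, j + 1, by omega, by simpa using hj, by rw [List.getD_cons_succ, List.getD_cons_zero, hjb]⟩
      · exact ⟨k + 1, l + 1, by omega, by simpa using hl, by simp⟩
    · rintro ⟨k, l, hkl, hl, rfl⟩
      cases k with
      | zero =>
        left
        cases l with
        | zero => omega
        | succ l' =>
          refine ⟨R.getD l' 0, ?_, by simp⟩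
          have hl' : l' < R.length := by simpa using hl
          rw [List.getD_eq_getElem _ 0 hl']
          exact List.getElem_mem hl'
      | succ k' =>
        right
        cases l with
        | zero => omega
        | succ l' => exact ⟨k', l', by omega, by simpa using hl, by simp⟩

-- duplicates force a sum collision
theorem not_nodup_sums : ∀ (T : List Int), ¬ T.Nodup → ¬ (sumsOf T).Nodup := by
  intro T
  induction T with
  | nil => intro h; exact absurd List.nodup_nil h
  | cons x R ih =>
    intro h hnd
    rw [sumsOf] at hnd
    rcases List.nodup_append.1 hnd with ⟨h1, h2, -⟩
    rw [List.nodup_cons] at h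
    push_neg at h
    by_cases hx : x ∈ R
    · simp only [List.map_cons, List.nodup_cons] at h1
      exact h1.1 (List.mem_map_of_mem hx)
    · exact ih (h hx) h2

-- strict monotonicity tools
theorem pvStrict_getD_lt {R : List Int} (h : R.Pairwise (· < ·)) :
    ∀ {k l : Nat}, k < l → l < R.length → R.getD k 0 < R.getD l 0 := by
  intro k l hkl hl
  rw [List.getD_eq_getElem _ 0 (by omega), List.getD_eq_getElem _ 0 hl]
  exact List.pairwise_iff_getElem.1 h k l (by omega) hl hkl

-- the heart: for a strictly increasing list, sum collisions and difference collisions coincide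
theorem strict_sums_iff_diffs : ∀ (T : List Int), T.Pairwise (· < ·) →
    ((sumsOf T).Nodup ↔ (diffsOf T).Nodup) := by
  intro T
  induction T with
  | nil => intro _; simp [sumsOf, diffsOf]
  | cons x R ih =>
    intro h
    rcases List.pairwise_cons.1 h with ⟨hx, hR⟩
    have hndT : (x :: R).Nodup := h.imp ne_of_lt
    have hndR : R.Nodup := hR.imp ne_of_lt
    rw [sumsOf, diffsOf, List.nodup_append, List.nodup_append]
    have hrowS : ((x :: R).map (fun b => x + b)).Nodup :=
      hndT.map (fun a b hab => by omega)
    have hrowD : (R.map (fun b => b - x)).Nodup :=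
      hndR.map (fun a b hab => by omega)
    rw [iff_true_intro hrowS, iff_true_intro hrowD, true_and, true_and]
    have hdisj : (((x :: R).map (fun b => x + b)).Disjoint (sumsOf R))
        ↔ ((R.map (fun b => b - x)).Disjoint (diffsOf R)) := by
      constructor
      · -- a diff collision yields a sum collision (contrapositive)
        intro hS v hvD hvDR
        obtain ⟨t, ht, rfl⟩ := List.mem_map.1 hvD
        obtain ⟨k, l, hkl, hl, heq⟩ := (mem_diffsOf_iff R _).1 hvDR
        obtain ⟨m, hm, hmt⟩ := pvGetD_index_of_mem ht
        -- t - x = R[l] - R[k]  ⇒  x + R[l] = R[k] + t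
        have hsum : x + R.getD l 0 = R.getD k 0 + R.getD m 0 := by
          rw [hmt]; omega
        have hmemrow : x + R.getD l 0 ∈ (x :: R).map (fun b => x + b) := by
          apply List.mem_map_of_mem
          exact List.mem_cons_of_mem x (by
            rw [List.getD_eq_getElem _ 0 hl]; exact List.getElem_mem hl)
        have hmemsums : x + R.getD l 0 ∈ sumsOf R := by
          rw [mem_sumsOf_iff]
          rcases le_total k m with hkm | hmk
          · exact ⟨k, m, hkm, hm, hsum⟩
          · exact ⟨m, k, hmk, by omega, by omega⟩
        exact hS hmemrow hmemsums
      · -- a sum collision yields a diff collision (contrapositive)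
        intro hD v hvS hvSR
        obtain ⟨t, ht, rfl⟩ := List.mem_map.1 hvS
        obtain ⟨k, l, hkl, hl, heq⟩ := (mem_sumsOf_iff R _).1 hvSR
        have hxk : x < R.getD k 0 := by
          apply hx
          rw [List.getD_eq_getElem _ 0 (by omega : k < R.length)]
          exact List.getElem_mem _
        rcases List.mem_cons.1 ht with htx | htR
        · -- t = x : 2x = R[k] + R[l] is impossible since x < both
          have hxl : x < R.getD l 0 := by
            apply hx
            rw [List.getD_eq_getElem _ 0 hl]
            exact List.getElem_mem _
          rw [htx] at heq
          omega
        · obtain ⟨j, hj, hjt⟩ := pvGetD_index_of_mem htR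
          -- x + R[j] = R[k] + R[l] with x < R[k] gives R[l] < R[j], hence l < j
          have hlv : R.getD l 0 < R.getD j 0 := by rw [hjt]; omega
          have hlj : l < j := by
            by_contra hc
            rcases Nat.lt_or_ge j l with hjl | hge
            · exact absurd hlv (not_lt.2 (le_of_lt (pvStrict_getD_lt hR hjl hl)))
            · have hjl' : j = l := by omega
              rw [hjl'] at hlv
              omega
          rw [← hjt] at heq
          have hmemrow : R.getD k 0 - x ∈ R.map (fun b => b - x) := by
            apply List.mem_map_of_mem
            rw [List.getD_eq_getElem _ 0 (by omega : k < R.length)]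
            exact List.getElem_mem _
          have hmemdiffs : R.getD k 0 - x ∈ diffsOf R := by
            rw [mem_diffsOf_iff]
            exact ⟨l, j, hlj, hj, by omega⟩
          exact hD hmemrow hmemdiffs
    simp only [← List.disjoint_iff_ne]
    rw [hdisj, ih hR]

-- main characterization for a (weakly) sorted list
theorem main_iff (T : List Int) (h : T.Pairwise (· ≤ ·)) :
    (sumsOf T).Nodup ↔ (T.Nodup ∧ (diffsOf T).Nodup) := by
  constructor
  · intro hs
    have hnd : T.Nodup := by
      by_contra hc
      exact not_nodup_sums T hc hs
    have hstrict : T.Pairwise (· < ·) :=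
      (h.and hnd).imp (fun hab => lt_of_le_of_ne hab.1 hab.2)
    exact ⟨hnd, (strict_sums_iff_diffs T hstrict).1 hs⟩
  · rintro ⟨hnd, hd⟩
    have hstrict : T.Pairwise (· < ·) :=
      (h.and hnd).imp (fun hab => lt_of_le_of_ne hab.1 hab.2)
    exact (strict_sums_iff_diffs T hstrict).2 hd

-- port A computes Nodup of sumsOf of the sorted list
theorem A_iff (S : List Int) :
    is_sidon_check S = true ↔ (sumsOf (PySem.List.sorted S (fun x => x) false)).Nodup := by
  unfold is_sidon_check
  set T := PySem.List.sorted S (fun x => x) false with hT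
  set e := PySem.List.enumerate T with he
  rw [pvOuterA_eq]
  have hflat : e.flatMap (fun p => ((e.filter (fun q => decide (p.1 ≤ q.1))).map (fun q => p.2 + q.2)))
      = e.flatMap (fun p => (PySem.List.slice T (some p.1) none).map (fun b => p.2 + b)) := by
    apply List.flatMap_congr
    intro p hp
    exact row_eq T hp
  rw [hflat, he]
  rw [show PySem.List.enumerate T = PySem.List.enumerate T ((0 : Nat) : Int) from rfl]
  rw [flat_sums_eq T T 0 (by simp)]
  rw [pvAddAll_isSome]
  simp [PySem.Set.empty]

-- port B computes element-distinctness and Nodup of diffsOf of the sorted list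
theorem B_iff (S : List Int) :
    is_sidon_check_alt S = true
      ↔ ((PySem.List.sorted S (fun x => x) false).Nodup
          ∧ (diffsOf (PySem.List.sorted S (fun x => x) false)).Nodup) := by
  simp only [is_sidon_check_alt]
  rw [show PySem.List.enumerate (PySem.List.sorted S (fun x => x) false)
        = PySem.List.enumerate (PySem.List.sorted S (fun x => x) false) ((0 : Nat) : Int) from rfl]
  rw [flat_diffs_eq _ _ 0 (by simp)]
  rw [Bool.and_eq_true, beq_iff_eq, beq_iff_eq,
      length_ofList_eq_iff_nodup, length_ofList_eq_iff_nodup]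

-- ===== VERDICT (by name: the statement is the Claim_ definition above) =====
theorem is_sidon_check_spec : Claim_equal_is_sidon_check := by
  intro S _
  unfold Spec_is_sidon_check
  have hsorted : (PySem.List.sorted S (fun x => x) false).Pairwise (· ≤ ·) := by
    have := PySem.List.sorted_pairwise S (fun x => x)
    simpa using this
  have := (A_iff S).trans ((main_iff _ hsorted).trans (B_iff S).symm)
  exact Bool.eq_iff_iff.2 this
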